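-- pv_equiv track=rewrite | github.com/clover3/Chair | src/data_generator/data_parser/trec.py | get_tf_index
-- ===== SOURCE A (Python) =====
-- from collections import Counter, defaultdict
--
-- def get_tf_index(inv_index, lower=False):
--     result = dict()
--     for term, posting_list in inv_index.items():
--         count_list = Counter()
--         for doc_id, word_pos in posting_list:
--             count_list[doc_id] += 1
--         if lower:
--             term = term.lower()
--             if term not in result:
--                 result[term] = count_list
--             else:
--                 for key in count_list.keys():
--                     result[term][key] += count_list[key]
--         else:
--             result[term] = count_list
--
--
--     return result
-- ===== SOURCE B (Python) =====
-- from collections import Counter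
--
--
-- def get_tf_index(inv_index, lower=False):
--     # Staged group-by: first collect the distinct output keys in first-occurrence
--     # order, then for each key re-scan the whole index and count every matching
--     # posting with a single Counter() over the concatenated doc ids.
--     def kf(t):
--         return t.lower() if lower else t
--
--     keys = list(dict.fromkeys(kf(t) for t in inv_index))
--     return {k: Counter(doc_id
--                        for t, pl in inv_index.items() if kf(t) == k
--                        for doc_id, _word_pos in pl)
--             for k in keys}
-- ===== Notes on version B (the rewrite author's own statement) =====
-- stated objective: alternative
-- what changed: A builds the result incrementally in one pass, making a fresh Counter per term and either inserting it or merging it key-by-key on a lowercase collision; B is a staged group-by: it first lists the distinct (possibly lowered) keys in first-occurrence order, then for each key re-scans the index and counts all matching postings with a single Counter over the concatenated doc ids — no incremental dict state and no merge branch. Pre_ only excludes association lists with duplicate term keys, which represent no Python dict input.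
import Mathlib
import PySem

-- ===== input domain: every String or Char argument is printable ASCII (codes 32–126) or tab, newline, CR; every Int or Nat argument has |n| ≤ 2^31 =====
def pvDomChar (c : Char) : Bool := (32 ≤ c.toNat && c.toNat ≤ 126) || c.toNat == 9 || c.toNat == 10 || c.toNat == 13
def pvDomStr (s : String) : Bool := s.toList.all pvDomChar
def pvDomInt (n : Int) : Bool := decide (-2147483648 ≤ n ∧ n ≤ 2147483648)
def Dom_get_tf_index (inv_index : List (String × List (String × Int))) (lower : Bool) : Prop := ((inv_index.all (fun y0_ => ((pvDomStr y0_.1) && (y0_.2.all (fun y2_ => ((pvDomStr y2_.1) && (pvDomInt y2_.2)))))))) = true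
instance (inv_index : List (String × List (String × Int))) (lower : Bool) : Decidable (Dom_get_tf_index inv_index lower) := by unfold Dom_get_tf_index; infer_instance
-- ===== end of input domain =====

-- B replaces A's incremental build (per-term Counter inserted or merged key-by-key into a growing
-- dict) by a staged group-by: list the distinct output keys first, then for each key re-scan the
-- whole index and count all matching postings with one Counter; same return value, alternative shape.

-- ===== PORT A =====
-- literal port of A: per-term Counter, then insert, or (lower) merge key-by-key into the existing entry
def get_tf_index (inv_index : List (String × List (String × Int))) (lower : Bool) : List (String × List (String × Int)) :=
  let result := inv_index.foldl (fun (result : PySem.Dict String (PySem.Dict String Int)) tp =>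
    let count_list := tp.2.foldl (fun (c : PySem.Dict String Int) p => c.modify p.1 0 (· + 1)) PySem.Dict.empty
    if lower then
      let term := PySem.Str.lower tp.1
      if result.contains term = false then
        result.insert term count_list
      else
        result.insert term
          ((count_list.keys).foldl
            (fun (e : PySem.Dict String Int) k => e.insert k (e.getD k 0 + count_list.getD k 0))
            (result.getD term PySem.Dict.empty))
    else
      result.insert tp.1 count_list) PySem.Dict.empty
  result.items.map (fun p => (p.1, p.2.items))

-- ===== PORT B =====
-- literal port of B: keys = list(dict.fromkeys(kf(t) for t in inv_index)) (ordered dedup =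
-- PySem.List.dedup), then a dict comprehension building, per key, Counter over the doc ids of all
-- matching posting lists (the generator = filter on the key, then flatMap of the doc-id column)
def get_tf_index_alt (inv_index : List (String × List (String × Int))) (lower : Bool) : List (String × List (String × Int)) :=
  let kf := fun (t : String) => if lower then PySem.Str.lower t else t
  let keys := PySem.List.dedup (inv_index.map (fun p => kf p.1))
  keys.map (fun k =>
    (k, (PySem.Dict.counter
          ((inv_index.filter (fun p => kf p.1 == k)).flatMap (fun p => p.2.map (·.1)))).items))

-- ===== PRECONDITION & SPEC =====
-- inv_index models a Python dict, whose keys are necessarily distinct; Pre_ excludes the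
-- duplicate-key association lists, which represent no dict input A could ever receive.
def Pre_get_tf_index (inv_index : List (String × List (String × Int))) (lower : Bool) : Prop :=
  (inv_index.map (·.1)).Nodup
instance (inv_index : List (String × List (String × Int))) (lower : Bool) : Decidable (Pre_get_tf_index inv_index lower) := by unfold Pre_get_tf_index; infer_instance

def pvWitness_get_tf_index : (List (String × List (String × Int))) × Bool :=
  ([("The", [("d1", 0), ("d2", 3), ("d1", 7)]), ("the", [("d1", 1)]), ("zz", [])], true)

def Spec_get_tf_index (inv_index : List (String × List (String × Int))) (lower : Bool) (out : List (String × List (String × Int))) : Prop := out = get_tf_index_alt inv_index lower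
instance (inv_index : List (String × List (String × Int))) (lower : Bool) (out : List (String × List (String × Int))) : Decidable (Spec_get_tf_index inv_index lower out) := by unfold Spec_get_tf_index; infer_instance

-- ===== CLAIM (what is proved, stated in full; the proofs are below) =====
def Claim_equal_get_tf_index : Prop := ∀ (inv_index : List (String × List (String × Int))) (lower : Bool), Dom_get_tf_index inv_index lower → Pre_get_tf_index inv_index lower → Spec_get_tf_index inv_index lower (get_tf_index inv_index lower)

-- ===== LEMMAS AND PROOFS =====

-- A's per-step update of the outer dict
def pvStepA (lower : Bool) (result : PySem.Dict String (PySem.Dict String Int))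
    (tp : String × List (String × Int)) : PySem.Dict String (PySem.Dict String Int) :=
  let count_list := tp.2.foldl (fun (c : PySem.Dict String Int) p => c.modify p.1 0 (· + 1)) PySem.Dict.empty
  if lower then
    let term := PySem.Str.lower tp.1
    if result.contains term = false then
      result.insert term count_list
    else
      result.insert term
        ((count_list.keys).foldl
          (fun (e : PySem.Dict String Int) k => e.insert k (e.getD k 0 + count_list.getD k 0))
          (result.getD term PySem.Dict.empty))
  else
    result.insert tp.1 count_list

-- proof-side single-pass middle form: one dict, each posting counted straight into its entry
def pvStepM (lower : Bool) (result : PySem.Dict String (PySem.Dict String Int))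
    (tp : String × List (String × Int)) : PySem.Dict String (PySem.Dict String Int) :=
  let key := if lower then PySem.Str.lower tp.1 else tp.1
  let counts := result.getD key PySem.Dict.empty
  result.insert key (tp.2.foldl (fun (c : PySem.Dict String Int) p => c.modify p.1 0 (· + 1)) counts)

-- the doc-id column of the posting lists of the terms mapping to key k
def pvDocs (lower : Bool) (l : List (String × List (String × Int))) (k : String) : List String :=
  (l.filter (fun p => (if lower then PySem.Str.lower p.1 else p.1) == k)).flatMap (fun p => p.2.map (·.1))

theorem get_tf_index_eq_foldA (inv_index : List (String × List (String × Int))) (lower : Bool) :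
    get_tf_index inv_index lower
      = (inv_index.foldl (pvStepA lower) PySem.Dict.empty).items.map (fun p => (p.1, p.2.items)) := rfl

-- getD through A's merge loop over a Nodup key list
theorem getD_merge_loop (c : PySem.Dict String Int) (v : String) :
    ∀ (ks : List String) (e : PySem.Dict String Int), ks.Nodup →
    (ks.foldl (fun (e : PySem.Dict String Int) k => e.insert k (e.getD k 0 + c.getD k 0)) e).getD v 0
      = e.getD v 0 + (if v ∈ ks then c.getD v 0 else 0) := by
  intro ks
  induction ks with
  | nil => intro e _; simp
  | cons k rest ih =>
    intro e hnd
    rw [List.nodup_cons] at hnd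
    simp only [List.foldl_cons, ih _ hnd.2, PySem.Dict.getD_insert]
    by_cases hv : v = k
    · subst hv
      simp [hnd.1]
    · simp [hv, List.mem_cons]

-- counting postings straight into an existing counter (M) equals counting them into a
-- fresh Counter and then merging it key-by-key into the existing one (A)
theorem count_into_eq_merge (l : List String) (e : PySem.Dict String Int) (he : e.keys.Nodup) :
    l.foldl (fun (c : PySem.Dict String Int) x => c.modify x 0 (· + 1)) e
      = ((PySem.Dict.counter l).keys).foldl
          (fun (e' : PySem.Dict String Int) k => e'.insert k (e'.getD k 0 + (PySem.Dict.counter l).getD k 0)) e := by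
  apply PySem.Dict.ext
  have hnr : (((PySem.Dict.counter l).keys).foldl
      (fun (e' : PySem.Dict String Int) k => e'.insert k (e'.getD k 0 + (PySem.Dict.counter l).getD k 0)) e).keys.Nodup :=
    PySem.Dict.nodup_keys_foldl_insert _ _ e he
  have hkeys : (l.foldl (fun (c : PySem.Dict String Int) x => c.modify x 0 (· + 1)) e).keys
      = (((PySem.Dict.counter l).keys).foldl
          (fun (e' : PySem.Dict String Int) k => e'.insert k (e'.getD k 0 + (PySem.Dict.counter l).getD k 0)) e).keys := by
    rw [PySem.Dict.keys_foldl_modify l 0 (fun _ _ => (· + 1)) e,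
      PySem.Dict.keys_foldl_insert ((PySem.Dict.counter l).keys)
        (fun e' k => e'.getD k 0 + (PySem.Dict.counter l).getD k 0) e,
      PySem.Dict.keys_counter,
      PySem.Set.update_eq_append_filter, PySem.Set.update_eq_append_filter, PySem.Set.ofList_ofList]
  have hnl : (l.foldl (fun (c : PySem.Dict String Int) x => c.modify x 0 (· + 1)) e).keys.Nodup := by
    rw [hkeys]; exact hnr
  rw [PySem.Dict.items_eq_map_keys _ hnl 0, PySem.Dict.items_eq_map_keys _ hnr 0, hkeys]
  apply List.map_congr_left
  intro k _
  rw [PySem.Dict.getD_foldl_modify_add_one,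
    getD_merge_loop _ k _ e ((PySem.Dict.keys_counter l) ▸ PySem.Set.nodup_ofList l),
    PySem.Dict.keys_counter]
  by_cases hv : k ∈ l
  · simp [PySem.Set.mem_ofList, hv, PySem.Dict.getD_counter]
  · simp [PySem.Set.mem_ofList, hv, List.count_eq_zero_of_not_mem hv]

-- the inner loop over postings counts their first components
theorem foldl_postings_eq_map (pl : List (String × Int)) (e : PySem.Dict String Int) :
    pl.foldl (fun (c : PySem.Dict String Int) p => c.modify p.1 0 (· + 1)) e
      = (pl.map (·.1)).foldl (fun (c : PySem.Dict String Int) x => c.modify x 0 (· + 1)) e := by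
  rw [List.foldl_map]

-- A's loop agrees with the middle form, given: distinct keys so far, every stored counter has
-- distinct keys, and (lower = false) no remaining term is already a key
theorem foldA_eq_foldM (lower : Bool) :
    ∀ (l : List (String × List (String × Int))) (r : PySem.Dict String (PySem.Dict String Int)),
    r.keys.Nodup →
    (∀ k, (r.getD k PySem.Dict.empty).keys.Nodup) →
    (lower = false → (l.map (·.1)).Nodup ∧ ∀ p ∈ l, r.contains p.1 = false) →
    l.foldl (pvStepA lower) r = l.foldl (pvStepM lower) r := by
  intro l
  induction l with
  | nil => intro r _ _ _; rfl
  | cons tp rest ih =>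
    intro r hnd hinner hfresh
    have hstep : pvStepA lower r tp = pvStepM lower r tp := by
      unfold pvStepA pvStepM
      cases lower with
      | false =>
        have hc : r.contains tp.1 = false := ((hfresh rfl).2 tp (by simp))
        simp only [Bool.false_eq_true, if_false]
        rw [PySem.Dict.getD_of_not_contains _ _ hc]
      | true =>
        simp only [if_true]
        by_cases hc : r.contains (PySem.Str.lower tp.1) = false
        · rw [if_pos hc, PySem.Dict.getD_of_not_contains _ _ hc]
        · rw [if_neg hc, foldl_postings_eq_map tp.2 PySem.Dict.empty,
            foldl_postings_eq_map tp.2 (r.getD (PySem.Str.lower tp.1) PySem.Dict.empty),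
            ← PySem.Dict.counter_eq_foldl,
            ← count_into_eq_merge (tp.2.map (·.1)) _ (hinner (PySem.Str.lower tp.1))]
    rw [List.foldl_cons, List.foldl_cons, hstep]
    have hB : pvStepM lower r tp
        = r.insert (if lower then PySem.Str.lower tp.1 else tp.1)
            (tp.2.foldl (fun (c : PySem.Dict String Int) p => c.modify p.1 0 (· + 1))
              (r.getD (if lower then PySem.Str.lower tp.1 else tp.1) PySem.Dict.empty)) := rfl
    apply ih
    · rw [hB]; exact PySem.Dict.nodup_keys_insert _ _ _ hnd
    · intro k
      rw [hB, PySem.Dict.getD_insert]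
      by_cases hk : k = (if lower then PySem.Str.lower tp.1 else tp.1)
      · rw [if_pos hk]
        have := PySem.Dict.nodup_keys_foldl_modify_key tp.2 (·.1) 0 (fun _ _ => (· + 1))
          (r.getD (if lower then PySem.Str.lower tp.1 else tp.1) PySem.Dict.empty) (hinner _)
        simpa using this
      · rw [if_neg hk]; exact hinner k
    · intro hl
      obtain ⟨hndl, hfr⟩ := hfresh hl
      subst hl
      rw [List.map_cons, List.nodup_cons] at hndl
      refine ⟨hndl.2, ?_⟩
      intro p hp
      rw [hB]
      simp only [Bool.false_eq_true, if_false, PySem.Dict.contains_insert]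
      have h1 : (p.1 == tp.1) = false := by
        simp only [beq_eq_false_iff_ne, ne_eq]
        intro he
        exact hndl.1 (he ▸ (List.mem_map_of_mem hp))
      rw [h1, hfr p (List.mem_cons_of_mem _ hp), Bool.or_self]

-- the middle form's entry at k is the Counter of the doc-id column of the matching terms
theorem getD_foldM (lower : Bool) (l : List (String × List (String × Int))) (k : String) :
    (l.foldl (pvStepM lower) PySem.Dict.empty).getD k PySem.Dict.empty
      = PySem.Dict.counter (pvDocs lower l k) := by
  induction l using List.reverseRecOn with
  | nil => simp [pvDocs, PySem.Dict.counter]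
  | append_singleton l tp ih =>
    rw [List.foldl_append, List.foldl_cons, List.foldl_nil]
    have hdocs : pvDocs lower (l ++ [tp]) k
        = pvDocs lower l k
          ++ (if ((if lower then PySem.Str.lower tp.1 else tp.1) == k)
              then tp.2.map (·.1) else []) := by
      unfold pvDocs
      rw [List.filter_append]
      by_cases h : ((if lower then PySem.Str.lower tp.1 else tp.1) == k) = true
      · simp [h]
      · simp [h]
    show ((l.foldl (pvStepM lower) PySem.Dict.empty).insert (if lower then PySem.Str.lower tp.1 else tp.1)
        (tp.2.foldl (fun (c : PySem.Dict String Int) p => c.modify p.1 0 (· + 1))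
          ((l.foldl (pvStepM lower) PySem.Dict.empty).getD (if lower then PySem.Str.lower tp.1 else tp.1)
            PySem.Dict.empty))).getD k PySem.Dict.empty = _
    rw [PySem.Dict.getD_insert, hdocs]
    by_cases hk : k = (if lower then PySem.Str.lower tp.1 else tp.1)
    · rw [if_pos hk, ← hk, ih, if_pos (show (k == k) = true by simp),
        PySem.Dict.counter_eq_foldl, PySem.Dict.counter_eq_foldl,
        List.foldl_append, foldl_postings_eq_map]
    · rw [if_neg hk, ih]
      have hbeq : ((if lower then PySem.Str.lower tp.1 else tp.1) == k) = false := by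
        simp [beq_eq_false_iff_ne]
        exact fun h => hk h.symm
      rw [hbeq]
      simp

-- the middle form's keys, in order: the ordered dedup of the (possibly lowered) terms
theorem keys_foldM (lower : Bool) (l : List (String × List (String × Int))) :
    (l.foldl (pvStepM lower) PySem.Dict.empty).keys
      = PySem.Set.ofList (l.map (fun p => if lower then PySem.Str.lower p.1 else p.1)) := by
  have := PySem.Dict.keys_foldl_insert_key (l := l)
    (key := fun tp => if lower then PySem.Str.lower tp.1 else tp.1)
    (f := fun r tp => tp.2.foldl (fun (c : PySem.Dict String Int) p => c.modify p.1 0 (· + 1))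
      (r.getD (if lower then PySem.Str.lower tp.1 else tp.1) PySem.Dict.empty))
    (d := PySem.Dict.empty)
  simpa [PySem.Set.update, PySem.Set.ofList_eq_foldl] using this

-- ===== VERDICT (by name: the statement is the Claim_ definition above) =====
theorem get_tf_index_spec : Claim_equal_get_tf_index := by
  intro inv_index lower _ hpre
  unfold Spec_get_tf_index
  rw [get_tf_index_eq_foldA,
    foldA_eq_foldM lower inv_index PySem.Dict.empty (by simp) (by simp)
      (fun _ => ⟨hpre, fun p _ => by simp⟩)]
  have hnd : (inv_index.foldl (pvStepM lower) PySem.Dict.empty).keys.Nodup := by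
    rw [keys_foldM]; exact PySem.Set.nodup_ofList _
  rw [PySem.Dict.items_eq_map_keys _ hnd PySem.Dict.empty, keys_foldM, List.map_map]
  simp only [get_tf_index_alt]
  have hded : PySem.List.dedup (inv_index.map (fun p => if lower then PySem.Str.lower p.1 else p.1))
      = PySem.Set.ofList (inv_index.map (fun p => if lower then PySem.Str.lower p.1 else p.1)) := by
    simp [pysem]
  rw [hded]
  apply List.map_congr_left
  intro k _
  simp only [Function.comp]
  rw [getD_foldM]
  rfl
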